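-- pv_equiv track=rewrite | github.com/TDS-Study/algorithm_study | 202207_1week/HJK_여행경로_레벨3.py | solution
-- ===== SOURCE A (Python) =====
-- def dfs(graph, start, visited, end_count):
--
--     # 더 갈곳이 없다
--     if start not in graph.keys() or len(graph[start]) == 0:
--         if len(visited) == end_count:
--             return visited
--         else:
--             return None
--
--     next_city = graph[start].pop(0)
--     visited.append(next_city)
--
--     return dfs(graph, next_city, visited, end_count)
--
-- def solution(tickets):
--     answer = []
--     graph = {}
--
--     # 출발도시, 도착도시로 된 딕셔너리 생성
--     # 일방통행 이므로 도착도사, 출발도시는 생성 안함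
--     # 표를 다 써야하므로 중복 허용, set 쓰면 안됨
--     for i in range(len(tickets)):
--         if tickets[i][0] not in graph:
--             graph[tickets[i][0]] = []
--
--         graph[tickets[i][0]].append(tickets[i][1])
--
--     for i in graph.values():
--         i.sort()
--
--     answer.append("ICN")
--     answer = dfs(graph, "ICN", answer, len(tickets)+1)
--
--     return answer
-- ===== SOURCE B (Python) =====
-- def solution(tickets):
--     remaining = [(t[0], t[1]) for t in tickets]
--     path = ["ICN"]
--     cur = "ICN"
--     while True:
--         dests = [d for s, d in remaining if s == cur]
--         if not dests:
--             break
--         nxt = min(dests)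
--         remaining.remove((cur, nxt))
--         path.append(nxt)
--         cur = nxt
--     return path if len(path) == len(tickets) + 1 else None
-- ===== Notes on version B (the rewrite author's own statement) =====
-- stated objective: alternative
-- what changed: The dict of per-source sorted adjacency lists and the recursive dfs are replaced by a sort-free selection walk over a flat list of (src, dst) pairs: each step takes the minimum destination among the remaining tickets leaving the current city and removes that ticket, with a single length check after the loop.
-- outside the precondition, e.g. on solution([['ICN']]): A raises IndexError, B raises IndexError
import Mathlib
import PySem

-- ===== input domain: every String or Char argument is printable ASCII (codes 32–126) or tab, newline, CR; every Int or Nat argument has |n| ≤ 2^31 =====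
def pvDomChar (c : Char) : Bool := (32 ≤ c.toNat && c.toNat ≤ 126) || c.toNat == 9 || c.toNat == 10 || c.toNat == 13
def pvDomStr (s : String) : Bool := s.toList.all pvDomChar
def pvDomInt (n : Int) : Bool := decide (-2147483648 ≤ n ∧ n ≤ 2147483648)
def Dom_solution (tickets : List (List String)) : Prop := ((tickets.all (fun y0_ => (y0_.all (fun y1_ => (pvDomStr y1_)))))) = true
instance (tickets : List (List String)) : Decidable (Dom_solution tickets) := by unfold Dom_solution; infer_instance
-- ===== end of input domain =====

-- B replaces A's dict of per-source sorted adjacency lists + recursive dfs by a sort-free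
-- selection walk over a flat list of (src, dst) pairs (objective: alternative algorithm,
-- same cost). Return-value equivalence only.

-- ===== PORT A =====
-- t[0] / t[1]; exact on Pre_solution (every ticket has ≥ 2 entries, so Python never raises there)
def pvT0 (t : List String) : String := PySem.List.pyGetD t 0 ""
def pvT1 (t : List String) : String := PySem.List.pyGetD t 1 ""

-- A's first loop: `if tickets[i][0] not in graph: graph[tickets[i][0]] = []` then append
-- (the append is modify with a default that is never used: the key is present after the insert)
def pvBuildA (tickets : List (List String)) : PySem.Dict String (List String) :=
  tickets.foldl
    (fun g t =>
      let g' := if g.contains (pvT0 t) then g else g.insert (pvT0 t) []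
      g'.modify (pvT0 t) [] (fun l => l ++ [pvT1 t]))
    PySem.Dict.empty

-- `for i in graph.values(): i.sort()` — in-place sort of every value
def pvSortVals (g : PySem.Dict String (List String)) : PySem.Dict String (List String) :=
  PySem.Dict.mk (g.items.map (fun p => (p.1, PySem.List.sorted p.2 (fun x => x) false)))

-- A's recursive dfs; `graph[start].pop(0)` then recurse. The fuel strictly exceeds the number of
-- recursive steps (each step removes one of the ≤ len(tickets) edges), so the 0 branch is never hit.
def dfsA (fuel : Nat) (graph : PySem.Dict String (List String)) (start : String)
    (visited : List String) (endCount : Nat) : Option (List String) :=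
  match fuel with
  | 0 => none
  | fuel + 1 =>
    match graph.get? start with
    | none => if visited.length = endCount then some visited else none
    | some [] => if visited.length = endCount then some visited else none
    | some (next :: rest) =>
        dfsA fuel (graph.insert start rest) next (visited ++ [next]) endCount

def solution (tickets : List (List String)) : Option (List String) :=
  let graph := pvSortVals (pvBuildA tickets)
  dfsA (tickets.length + 1) graph "ICN" ["ICN"] (tickets.length + 1)

-- ===== PORT B =====
-- B's loop body: `dests = [d for s, d in remaining if s == cur]; if not dests: break;
-- nxt = min(dests); remaining.remove((cur, nxt)); path.append(nxt); cur = nxt`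
-- (fuel exceeds the number of iterations: each iteration removes one of the ≤ len(tickets)
-- pairs, so the 0 branch is never hit; the remove? `none` branch is unreachable, (cur, nxt)
-- is always present)
def walkB (fuel : Nat) (remaining : List (String × String)) (cur : String)
    (path : List String) : List String :=
  match fuel with
  | 0 => path
  | fuel + 1 =>
    let dests := (remaining.filter (fun p => p.1 == cur)).map Prod.snd
    match PySem.List.min? dests (fun x => x) with
    | none => path
    | some nxt =>
      match PySem.List.remove? remaining (cur, nxt) with
      | none => path
      | some remaining' => walkB fuel remaining' nxt (path ++ [nxt])

def solution_alt (tickets : List (List String)) : Option (List String) :=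
  let remaining := tickets.map (fun t => (pvT0 t, pvT1 t))
  let path := walkB (tickets.length + 1) remaining "ICN" ["ICN"]
  if path.length = tickets.length + 1 then some path else none

-- ===== PRECONDITION & SPEC =====
-- Pre_ excludes only tickets with fewer than 2 entries, on which the Python A raises IndexError.
def Pre_solution (tickets : List (List String)) : Prop := ∀ t ∈ tickets, 2 ≤ t.length
instance (tickets : List (List String)) : Decidable (Pre_solution tickets) := by
  unfold Pre_solution; infer_instance
def pvWitness_solution : List (List String) := [["ICN", "AAA"], ["AAA", "ICN"]]

def Spec_solution (tickets : List (List String)) (out : Option (List String)) : Prop :=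
  out = solution_alt tickets
instance (tickets : List (List String)) (out : Option (List String)) : Decidable (Spec_solution tickets out) := by
  unfold Spec_solution; infer_instance

-- ===== CLAIM (what is proved, stated in full; the proofs are below) =====
def Claim_equal_solution : Prop := ∀ (tickets : List (List String)),
  Dom_solution tickets → Pre_solution tickets → Spec_solution tickets (solution tickets)

-- ===== LEMMAS AND PROOFS =====

-- replacing the looked-up value of a key no list entry carries changes nothing under the map
theorem pv_map_id_of_ne (k v : String) (l : List (String × List String))
    (h : ∀ p ∈ l, p.1 ≠ k) :
    l.map (fun p => if p.1 = k then (k, ([] : List String) ++ [v]) else p) = l := by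
  induction l with
  | nil => rfl
  | cons p t ih =>
      simp only [List.map_cons, if_neg (h p (List.mem_cons_self))]
      rw [ih (fun q hq => h q (List.mem_cons_of_mem _ hq))]

theorem pv_get?_mk_append_self (k : String) (v : List String) (l : List (String × List String))
    (h : ∀ p ∈ l, p.1 ≠ k) :
    (PySem.Dict.mk (l ++ [(k, v)])).get? k = some v := by
  induction l with
  | nil => simp [PySem.Dict.get?_mk_cons]
  | cons p t ih =>
      rw [List.cons_append, PySem.Dict.get?_mk_cons,
        if_neg (by simpa using h p (List.mem_cons_self))]
      exact ih (fun q hq => h q (List.mem_cons_of_mem _ hq))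

-- A's conditional-insert-then-append step equals the plain setdefault-append step
theorem pv_step_eq (g : PySem.Dict String (List String)) (k v : String) :
    (if g.contains k then g else g.insert k []).modify k [] (fun l => l ++ [v])
      = g.modify k [] (fun l => l ++ [v]) := by
  by_cases hc : g.contains k = true
  · simp [hc]
  · have h : g.contains k = false := by simpa using hc
    have hk : k ∉ g.keys := by
      simpa [PySem.Dict.contains_eq_decide_mem_keys] using h
    have hkeys : ∀ p ∈ g.items, p.1 ≠ k := by
      intro p hp hpk
      exact hk (hpk ▸ List.mem_map_of_mem hp)
    have h0 : g.get? k = none := by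
      rw [PySem.Dict.get?_eq_none_iff_contains]; exact h
    have hgd : g.getD k [] = [] := by
      rw [PySem.Dict.getD_eq_get?_getD, h0]; rfl
    have hmk : (PySem.Dict.mk (g.items ++ [(k, ([] : List String))])).getD k [] = [] := by
      rw [PySem.Dict.getD_eq_get?_getD, pv_get?_mk_append_self k [] g.items hkeys]
      rfl
    simp [PySem.Dict.modify, PySem.Dict.insert, h, hgd, hmk]
    exact pv_map_id_of_ne k v g.items hkeys

-- A's build loop equals the one-step modify loop, so getD_foldl_modify_append applies
theorem pv_build_getD (tickets : List (List String)) (k : String) :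
    (pvBuildA tickets).getD k []
      = ((tickets.map (fun t => (pvT0 t, pvT1 t))).filter (fun p => p.1 == k)).map Prod.snd := by
  have hb : pvBuildA tickets
      = tickets.foldl (fun g t => g.modify (pvT0 t) [] (fun l => l ++ [pvT1 t]))
          PySem.Dict.empty := by
    unfold pvBuildA
    exact PySem.List.foldl_congr_mem _ _ _ _ (fun acc t _ => pv_step_eq acc (pvT0 t) (pvT1 t))
  rw [hb, ← List.foldl_map (f := fun t => (pvT0 t, pvT1 t))
      (g := fun (d : PySem.Dict String (List String)) p => d.modify p.1 [] (fun l => l ++ [p.2])),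
    PySem.Dict.getD_foldl_modify_append]
  simp

-- sorting every value of the dict sorts each lookup
theorem pv_get?_mk_map_sort (l : List (String × List String)) (k : String) :
    (PySem.Dict.mk (l.map (fun p => (p.1, PySem.List.sorted p.2 (fun x => x) false)))).get? k
      = ((PySem.Dict.mk l).get? k).map (fun v => PySem.List.sorted v (fun x => x) false) := by
  induction l with
  | nil => rfl
  | cons p t ih =>
      obtain ⟨a, b⟩ := p
      simp only [List.map_cons, PySem.Dict.get?_mk_cons]
      by_cases hk : a == k
      · simp [hk]
      · simp only [hk, Bool.false_eq_true, if_false]; exact ih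

theorem pv_sortVals_getD (g : PySem.Dict String (List String)) (k : String) :
    (pvSortVals g).getD k [] = PySem.List.sorted (g.getD k []) (fun x => x) false := by
  unfold pvSortVals
  rw [PySem.Dict.getD_eq_get?_getD, pv_get?_mk_map_sort]
  have : g = PySem.Dict.mk g.items := by apply PySem.Dict.ext; rfl
  rw [← this, PySem.Dict.getD_eq_get?_getD]
  cases g.get? k <;> rfl

-- Python's list.remove on a present element erases its first occurrence
theorem pv_remove?_of_mem (l : List (String × String)) (a : String × String) (h : a ∈ l) :
    PySem.List.remove? l a = some (l.erase a) := by
  rw [List.erase_eq_eraseIdx]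
  cases hi : List.idxOf? a l with
  | none => exact absurd h (by simpa using List.idxOf?_eq_none_iff.mp hi)
  | some i => simp [PySem.List.remove?, hi]

-- the walk invariant: each adjacency list of A's dict is an increasingly sorted permutation of
-- the destinations of B's remaining pairs leaving that city
theorem pv_dfs_eq_walk (fuel : Nat) (g : PySem.Dict String (List String))
    (rem : List (String × String)) (s : String) (v : List String) (e : Nat)
    (hf : e < fuel + v.length)
    (hInv : ∀ k, (g.getD k []).Pairwise (· ≤ ·) ∧
        (g.getD k []).Perm ((rem.filter (fun p => p.1 == k)).map Prod.snd)) :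
    dfsA fuel g s v e
      = (if (walkB fuel rem s v).length = e then some (walkB fuel rem s v) else none) := by
  induction fuel generalizing g rem s v with
  | zero =>
      simp only [walkB, dfsA]
      rw [if_neg (by omega)]
  | succ n ih =>
      obtain ⟨hpw, hperm⟩ := hInv s
      cases hgd : g.getD s [] with
      | nil =>
          have hF : (rem.filter (fun p => p.1 == s)).map Prod.snd = [] :=
            ((hgd ▸ hperm).symm).eq_nil
          have hmin : PySem.List.min? ((rem.filter (fun p => p.1 == s)).map Prod.snd)
              (fun x => x) = none := (PySem.List.min?_eq_none_iff _ _).mpr hF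
          cases hq : g.get? s with
          | none => simp [dfsA, walkB, hq, hmin]
          | some l =>
              have : l = [] := by
                have := hgd
                rw [PySem.Dict.getD_eq_get?_getD, hq] at this
                exact this
              subst this
              simp [dfsA, walkB, hq, hmin]
      | cons x rest =>
          have hq : g.get? s = some (x :: rest) := by
            cases hq : g.get? s with
            | none =>
                rw [PySem.Dict.getD_eq_get?_getD, hq] at hgd
                simp only [Option.getD_none] at hgd
                exact absurd hgd (by simp)
            | some l =>
                rw [PySem.Dict.getD_eq_get?_getD, hq] at hgd
                simp only [Option.getD_some] at hgd
                rw [hgd]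
          rw [hgd] at hperm hpw
          -- F := dests; x is its minimum
          have hxF : x ∈ (rem.filter (fun p => p.1 == s)).map Prod.snd :=
            hperm.mem_iff.mp (List.mem_cons_self)
          obtain ⟨m, hm⟩ : ∃ m, PySem.List.min? ((rem.filter (fun p => p.1 == s)).map Prod.snd)
              (fun x => x) = some m := by
            cases hmm : PySem.List.min? ((rem.filter (fun p => p.1 == s)).map Prod.snd)
                (fun x => x) with
            | none =>
                rw [PySem.List.min?_eq_none_iff] at hmm
                exact absurd (hmm ▸ hxF) (List.not_mem_nil)
            | some m => exact ⟨m, rfl⟩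
          have hmx : m = x := by
            have h1 : m ≤ x := PySem.List.min?_isMin hm x hxF
            have h2 : x ≤ m := by
              have hmF := PySem.List.min?_mem hm
              rcases List.mem_cons.mp (hperm.symm.mem_iff.mp hmF) with h | h
              · exact le_of_eq h.symm
              · exact List.rel_of_pairwise_cons hpw h
            exact le_antisymm h1 h2
          subst hmx
          -- (s, m) is a remaining pair
          have hsm : (s, m) ∈ rem := by
            rcases List.mem_map.mp hxF with ⟨⟨pa, pb⟩, hp, hps⟩
            have hp1 : pa = s := by simpa using List.of_mem_filter hp
            have hp2 : pb = m := hps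
            subst hp1; subst hp2
            exact List.mem_of_mem_filter hp
          have hrm := pv_remove?_of_mem rem (s, m) hsm
          obtain ⟨l₁, l₂, hnm, heq, herase⟩ := List.exists_erase_eq hsm
          -- the new invariant
          have hInv' : ∀ k, ((g.insert s rest).getD k []).Pairwise (· ≤ ·) ∧
              ((g.insert s rest).getD k []).Perm
                (((rem.erase (s, m)).filter (fun p => p.1 == k)).map Prod.snd) := by
            intro k
            by_cases hk : k = s
            · subst hk
              rw [PySem.Dict.getD_insert_self]
              refine ⟨hpw.of_cons, ?_⟩
              have hfil : (rem.filter (fun p => p.1 == k)).map Prod.snd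
                  = (l₁.filter (fun p => p.1 == k)).map Prod.snd
                    ++ m :: (l₂.filter (fun p => p.1 == k)).map Prod.snd := by
                rw [heq]; simp
              have hfil' : ((rem.erase (k, m)).filter (fun p => p.1 == k)).map Prod.snd
                  = (l₁.filter (fun p => p.1 == k)).map Prod.snd
                    ++ (l₂.filter (fun p => p.1 == k)).map Prod.snd := by
                rw [herase]; simp
              rw [hfil']
              have hmid : ((l₁.filter (fun p => p.1 == k)).map Prod.snd
                    ++ m :: (l₂.filter (fun p => p.1 == k)).map Prod.snd).Perm
                  (m :: ((l₁.filter (fun p => p.1 == k)).map Prod.snd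
                    ++ (l₂.filter (fun p => p.1 == k)).map Prod.snd)) := List.perm_middle
              exact ((hperm.trans (hfil ▸ hmid)).cons_inv)
            · rw [PySem.Dict.getD_insert_of_ne _ _ _ hk]
              refine ⟨(hInv k).1, (hInv k).2.trans (by
                rw [herase, heq]
                have hks : (s == k) = false := by simpa using fun h => hk h.symm
                simp [List.filter_append, hks])⟩
          simp only [dfsA, walkB, hq, hm, hrm]
          exact ih (g.insert s rest) (rem.erase (s, m)) m (v ++ [m]) (by simp; omega) hInv'

-- ===== VERDICT (by name: the statement is the Claim_ definition above) =====
theorem solution_spec : Claim_equal_solution := by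
  intro tickets _ _
  unfold Spec_solution solution solution_alt
  refine pv_dfs_eq_walk (tickets.length + 1) _ _ "ICN" ["ICN"] (tickets.length + 1)
    (by simp) ?_
  intro k
  rw [pv_sortVals_getD, pv_build_getD]
  exact ⟨PySem.List.sorted_pairwise _ _, PySem.List.sorted_perm _ _ _⟩
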